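-- pv_equiv track=rewrite | github.com/haiyinde/APS | Programmers/Level2/124나라의숫자.py | solution
-- ===== SOURCE A (Python) =====
-- def solution(n):
--     if n <= 3:
--         return '124'[n - 1]
--     else:
--         tmp1 = (n - 1) // 3
--         tmp2 = (n - 1) % 3
--         return solution(tmp1) + '124'[tmp2]
--
--     return answer
-- ===== SOURCE B (Python) =====
-- def solution(n):
--     digits = ''
--     while n > 3:
--         digits = '124'[(n - 1) % 3] + digits
--         n = (n - 1) // 3
--     return '124'[n - 1] + digits
-- ===== Notes on version B (the rewrite author's own statement) =====
-- stated objective: alternative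
-- what changed: Replaces A's recursion (call stack, string concatenation on return) with an explicit while loop that builds the digit string bottom-up by prepending, keeping the same base-124 recurrence.
-- outside the precondition, e.g. on solution(-3): A raises IndexError, B raises IndexError
import Mathlib
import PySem

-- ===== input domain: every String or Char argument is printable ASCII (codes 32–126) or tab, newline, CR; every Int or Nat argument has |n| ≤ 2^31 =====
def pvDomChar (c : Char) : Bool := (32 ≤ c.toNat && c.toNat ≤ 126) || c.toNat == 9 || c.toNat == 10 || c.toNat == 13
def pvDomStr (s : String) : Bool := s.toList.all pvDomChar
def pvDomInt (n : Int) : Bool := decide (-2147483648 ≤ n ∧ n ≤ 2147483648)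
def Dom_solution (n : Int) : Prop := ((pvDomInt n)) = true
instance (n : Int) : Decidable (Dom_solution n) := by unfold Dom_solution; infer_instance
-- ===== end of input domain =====

-- B rewrites A's recursion as an explicit while loop building the string by prepending (alternative decomposition, same recurrence).


-- ===== PORT A =====
-- '124'[i] as a one-character string; the .getD "" default is never hit inside Pre_ (there Python would raise IndexError)
def digit124 (i : Int) : String := ((PySem.Str.pyGet? "124" i).map (fun c => String.ofList [c])).getD ""

def solution (n : Int) : String :=
  if n ≤ 3 then digit124 (n - 1)
  else solution (PySem.Int.floordiv (n - 1) 3) ++ digit124 (PySem.Int.mod (n - 1) 3)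
termination_by n.toNat
decreasing_by
  rw [PySem.Int.floordiv_eq_ediv_of_pos (by omega : (0:Int) < 3)]
  omega

-- ===== PORT B =====
def solutionAltLoop (n : Int) (digits : String) : String :=
  if n > 3 then
    solutionAltLoop (PySem.Int.floordiv (n - 1) 3) (digit124 (PySem.Int.mod (n - 1) 3) ++ digits)
  else digit124 (n - 1) ++ digits
termination_by n.toNat
decreasing_by
  rw [PySem.Int.floordiv_eq_ediv_of_pos (by omega : (0:Int) < 3)]
  omega

def solution_alt (n : Int) : String := solutionAltLoop n ""

-- ===== PRECONDITION & SPEC =====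
-- Pre_ excludes n ≤ -3, where Python A's base-case indexing '124'[n-1] raises IndexError (B raises there too).
def Pre_solution (n : Int) : Prop := -2 ≤ n
instance (n : Int) : Decidable (Pre_solution n) := by unfold Pre_solution; infer_instance
def pvWitness_solution : Int := (10)

def Spec_solution (n : Int) (out : String) : Prop := out = solution_alt n
instance (n : Int) (out : String) : Decidable (Spec_solution n out) := by unfold Spec_solution; infer_instance

-- ===== CLAIM (what is proved, stated in full; the proofs are below) =====
def Claim_equal_solution : Prop := ∀ (n : Int), Dom_solution n → Pre_solution n → Spec_solution n (solution n)

-- ===== LEMMAS AND PROOFS =====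
theorem loop_eq_solution_append (n : Int) (digits : String) :
    solutionAltLoop n digits = solution n ++ digits := by
  induction n, digits using solutionAltLoop.induct with
  | case1 n digits h ih =>
      rw [solutionAltLoop, solution]
      rw [if_pos h, if_neg (by omega : ¬ n ≤ 3), ih, String.append_assoc]
  | case2 n digits h =>
      rw [solutionAltLoop, solution]
      rw [if_neg h, if_pos (by omega : n ≤ 3)]

-- ===== VERDICT (by name: the statement is the Claim_ definition above) =====
theorem solution_spec : Claim_equal_solution := by
  intro n _ _
  unfold Spec_solution solution_alt
  rw [loop_eq_solution_append, String.append_empty]
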